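-- pv_equiv track=rewrite | github.com/kngsujng/algorithm | 프로그래머스/lv1/12954. x만큼 간격이 있는 n개의 숫자/x만큼 간격이 있는 n개의 숫자.py | solution
-- ===== SOURCE A (Python) =====
-- def solution(x, n):
--     arr=[]
--     if x>0:
--         for i in range(x, n*x+1, x):
--             arr.append(i)
--     elif x<0:
--         for i in range(x, n*x-1, x):
--             arr.append(i)
--     else:
--          return [0]*n
--     return arr
-- ===== SOURCE B (Python) =====
-- def solution(x, n):
--     return [x * (i + 1) for i in range(n)]
-- ===== Notes on version B (the rewrite author's own statement) =====
-- stated objective: simpler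
-- what changed: Replaces the three sign-dependent branches (two stepped ranges plus a [0]*n case) with a single branch-free comprehension computing each element directly as x*(i+1).
import Mathlib
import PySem

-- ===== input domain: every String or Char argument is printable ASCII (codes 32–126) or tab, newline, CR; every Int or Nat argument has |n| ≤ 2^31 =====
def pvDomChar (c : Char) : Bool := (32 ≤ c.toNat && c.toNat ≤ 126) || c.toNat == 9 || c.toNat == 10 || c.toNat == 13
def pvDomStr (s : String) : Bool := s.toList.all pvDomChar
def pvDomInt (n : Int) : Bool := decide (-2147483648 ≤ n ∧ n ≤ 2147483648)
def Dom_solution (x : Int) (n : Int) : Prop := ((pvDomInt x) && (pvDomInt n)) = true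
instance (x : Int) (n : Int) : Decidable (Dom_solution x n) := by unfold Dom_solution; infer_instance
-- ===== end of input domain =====

-- B replaces A's three sign-dependent branches with one branch-free comprehension x*(i+1) over range(n); objective: simpler.


-- ===== PORT A =====
-- literal port: arr=[]; loop over the sign-chosen range appending; else [0]*n
def solution (x : Int) (n : Int) : List Int :=
  if x > 0 then
    (PySem.List.pyRange x (n * x + 1) x).foldl (fun arr i => arr ++ [i]) []
  else if x < 0 then
    (PySem.List.pyRange x (n * x - 1) x).foldl (fun arr i => arr ++ [i]) []
  else
    List.replicate n.toNat 0

-- ===== PORT B =====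
-- literal port of Source B: [x*(i+1) for i in range(n)]
def solution_alt (x : Int) (n : Int) : List Int :=
  (PySem.List.pyRange 0 n 1).map (fun i => x * (i + 1))

-- ===== PRECONDITION & SPEC =====
def Spec_solution (x : Int) (n : Int) (out : List Int) : Prop := out = solution_alt x n
instance (x : Int) (n : Int) (out : List Int) : Decidable (Spec_solution x n out) := by unfold Spec_solution; infer_instance

-- ===== CLAIM (what is proved, stated in full; the proofs are below) =====
def Claim_equal_solution : Prop := ∀ (x : Int) (n : Int), Dom_solution x n → Spec_solution x n (solution x n)

-- ===== LEMMAS AND PROOFS =====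

theorem foldl_append_singleton (l acc : List Int) :
    l.foldl (fun arr i => arr ++ [i]) acc = acc ++ l := by
  induction l generalizing acc with
  | nil => simp
  | cons h t ih => simp [List.foldl, ih]

theorem alt_eq_range (x n : Int) :
    solution_alt x n = (List.range n.toNat).map (fun (k : Nat) => x * ((k : Int) + 1)) := by
  unfold solution_alt
  rw [PySem.List.pyRange_one, List.map_map]
  simp

-- ===== VERDICT (by name: the statement is the Claim_ definition above) =====
theorem solution_spec : Claim_equal_solution := by
  intro x n _
  unfold Spec_solution
  rw [alt_eq_range]
  unfold solution
  rcases lt_trichotomy x 0 with hx | hx | hx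
  · rw [if_neg (by omega), if_pos hx, foldl_append_singleton,
      PySem.List.pyRange_of_neg _ _ hx]
    by_cases hn : 0 < n
    · have hb : n * x - 1 < x := by nlinarith
      rw [if_pos hb]
      have : (x - (n * x - 1) + -x - 1) / -x = n := by
        have : x - (n * x - 1) + -x - 1 = n * (-x) := by ring
        rw [this, Int.mul_ediv_cancel _ (by omega)]
      rw [this]
      simp only [List.nil_append]
      apply List.map_congr_left
      intro k _
      ring
    · have hb : ¬ (n * x - 1 < x) := by nlinarith
      rw [if_neg hb]
      have : n.toNat = 0 := by omega
      simp [this]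
  · subst hx
    rw [if_neg (by omega), if_neg (by omega)]
    simp
  · rw [if_pos hx, foldl_append_singleton, PySem.List.pyRange_of_pos _ _ hx]
    by_cases hn : 0 < n
    · have hb : x < n * x + 1 := by nlinarith
      rw [if_pos hb]
      have : (n * x + 1 - x + x - 1) / x = n := by
        have : n * x + 1 - x + x - 1 = n * x := by ring
        rw [this, Int.mul_ediv_cancel _ (by omega)]
      rw [this]
      simp only [List.nil_append]
      apply List.map_congr_left
      intro k _
      ring
    · have hb : ¬ (x < n * x + 1) := by nlinarith
      rw [if_neg hb]
      have : n.toNat = 0 := by omega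
      simp [this]
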